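-- pv_equiv track=rewrite | github.com/boringbyte/leetcode | leetcode/Meta/Revision1/Problems-101-150.py | can_place_flowers
-- ===== SOURCE A (Python) =====
-- def can_place_flowers(flowerbed, n):
--     count = 0
--     flowerbed = [0] + flowerbed + [0]
--     for i in range(1, len(flowerbed) - 1):
--         if flowerbed[i - 1] == flowerbed[i] == flowerbed[i + 1] == 0:
--             flowerbed[i] = 1
--             count += 1
--     return count >= n
-- ===== SOURCE B (Python) =====
-- def can_place_flowers(flowerbed, n):
--     # gap arithmetic over the indices of occupied plots (virtual occupied plots at -2 and len+1)
--     ones = [-2] + [i for i, v in enumerate(flowerbed) if v != 0] + [len(flowerbed) + 1]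
--     total = sum(max((q - p - 2) // 2, 0) for p, q in zip(ones, ones[1:]))
--     return total >= n
-- ===== Notes on version B (the rewrite author's own statement) =====
-- stated objective: simpler
-- what changed: Replaces A's in-place cell-by-cell greedy mutation of a padded copy of the bed by pure gap arithmetic: collect the indices of occupied plots (with virtual occupied plots at -2 and len+1) and sum max((q-p-2)//2, 0) over consecutive index pairs.
import Mathlib
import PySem

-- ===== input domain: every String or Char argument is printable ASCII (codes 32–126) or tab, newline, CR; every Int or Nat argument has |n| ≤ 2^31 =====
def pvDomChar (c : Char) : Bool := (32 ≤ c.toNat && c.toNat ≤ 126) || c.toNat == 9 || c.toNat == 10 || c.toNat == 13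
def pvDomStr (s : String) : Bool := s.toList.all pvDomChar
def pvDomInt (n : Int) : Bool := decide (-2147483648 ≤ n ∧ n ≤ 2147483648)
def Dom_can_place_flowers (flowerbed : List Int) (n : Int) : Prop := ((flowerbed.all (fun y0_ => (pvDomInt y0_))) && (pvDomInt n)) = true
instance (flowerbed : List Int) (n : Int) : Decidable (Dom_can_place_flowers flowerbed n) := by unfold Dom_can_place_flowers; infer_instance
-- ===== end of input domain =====

-- B replaces A's mutating cell-by-cell greedy by gap arithmetic over the indices of occupied
-- plots (objective: simpler one-pass arithmetic, same O(n) cost); equivalence is proved for all inputs.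

-- ===== PORT A =====
-- loop body of A's for-loop: Python's chained `fb[i-1] == fb[i] == fb[i+1] == 0`, then `fb[i] = 1; count += 1`
def stepA (st : List Int × Int) (i : Int) : List Int × Int :=
  if PySem.List.pyGetD st.1 (i - 1) 0 = PySem.List.pyGetD st.1 i 0 ∧
     PySem.List.pyGetD st.1 i 0 = PySem.List.pyGetD st.1 (i + 1) 0 ∧
     PySem.List.pyGetD st.1 (i + 1) 0 = 0 then
    (PySem.List.pySetD st.1 i 1, st.2 + 1)
  else st

def can_place_flowers (flowerbed : List Int) (n : Int) : Bool :=
  let fb : List Int := [0] ++ flowerbed ++ [0]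
  let st := (PySem.List.pyRange 1 ((fb.length : Int) - 1) 1).foldl stepA (fb, (0 : Int))
  decide (st.2 ≥ n)

-- ===== PORT B =====
def can_place_flowers_alt (flowerbed : List Int) (n : Int) : Bool :=
  let ones : List Int :=
    -2 :: ((PySem.List.enumerate flowerbed 0).filter (fun p => p.2 != 0)).map (fun p => p.1)
       ++ [(flowerbed.length : Int) + 1]
  let total := ((ones.zip ones.tail).map
    (fun pq => max (PySem.Int.floordiv (pq.2 - pq.1 - 2) 2) 0)).sum
  decide (total ≥ n)

-- ===== PRECONDITION & SPEC =====
def Spec_can_place_flowers (flowerbed : List Int) (n : Int) (out : Bool) : Prop := out = can_place_flowers_alt flowerbed n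
instance (flowerbed : List Int) (n : Int) (out : Bool) : Decidable (Spec_can_place_flowers flowerbed n out) := by unfold Spec_can_place_flowers; infer_instance

-- ===== CLAIM (what is proved, stated in full; the proofs are below) =====
def Claim_equal_can_place_flowers : Prop := ∀ (flowerbed : List Int) (n : Int), Dom_can_place_flowers flowerbed n → Spec_can_place_flowers flowerbed n (can_place_flowers flowerbed n)

-- ===== LEMMAS AND PROOFS =====

-- A's greedy scan, structurally: prev value, remaining padded suffix
def gA : Int → List Int → Int
  | prev, x :: y :: r => if prev = x ∧ x = y ∧ y = 0 then 1 + gA 1 (y :: r) else gA x (y :: r)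
  | _, _ => 0

-- common intermediate: zero-run counter (z = current run length, left pad included)
def T : Nat → List Int → Int
  | z, [] => ((z / 2 : Nat) : Int)
  | z, x :: r => if x = 0 then T (z + 1) r else (((z - 1) / 2 : Nat) : Int) + T 0 r

-- B's gap sum, structurally: previous one-index p, remaining one-indices, right sentinel e
def S : Int → List Int → Int → Int
  | p, [], e => max (PySem.Int.floordiv (e - p - 2) 2) 0
  | p, q :: r, e => max (PySem.Int.floordiv (q - p - 2) 2) 0 + S q r e

-- indices (from offset i) of the nonzero entries
def onesF : Int → List Int → List Int
  | _, [] => []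
  | i, x :: r => if x = 0 then onesF (i + 1) r else i :: onesF (i + 1) r

lemma getD_append_len (pre rest : List Int) (v d : Int) :
    (pre ++ v :: rest).getD pre.length d = v := by
  induction pre with
  | nil => rfl
  | cons a t ih => simpa using ih

lemma gA_one_zero (r : List Int) : gA 1 (0 :: r) = gA 0 r := by
  cases r with
  | nil => rfl
  | cons y t => simp [gA]

lemma gA_run (z : Nat) (v : Int) (t : List Int) (hv : v ≠ 0) :
    gA 0 (List.replicate z 0 ++ v :: t) = ((z / 2 : Nat) : Int) + gA v t := by
  induction z using Nat.strong_induction_on with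
  | _ z ih =>
    match z with
    | 0 =>
      cases t with
      | nil => simp [gA]
      | cons y s => simp [gA, Ne.symm hv]
    | 1 =>
      cases t with
      | nil => simp [gA, List.replicate, hv]
      | cons y s => simp [gA, List.replicate, Ne.symm hv]
    | (m + 2) =>
      have h : List.replicate (m + 2) 0 ++ v :: t
          = (0 : Int) :: 0 :: (List.replicate m 0 ++ v :: t) := by
        simp [List.replicate_succ]
      rw [h]
      have h2 : gA 0 ((0 : Int) :: 0 :: (List.replicate m 0 ++ v :: t))
          = 1 + gA 1 (0 :: (List.replicate m 0 ++ v :: t)) := by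
        cases m with
        | zero => simp [gA, hv]
        | succ m' => simp [gA, List.replicate_succ]
      rw [h2, gA_one_zero, ih m (by omega)]
      have : ((m + 2) / 2 : Nat) = (m / 2 : Nat) + 1 := by omega
      rw [this]; push_cast; ring

lemma gA_zeros (z : Nat) : gA 0 (List.replicate z 0) = ((z / 2 : Nat) : Int) := by
  induction z using Nat.strong_induction_on with
  | _ z ih =>
    match z with
    | 0 => rfl
    | 1 => rfl
    | (m + 2) =>
      have h : List.replicate (m + 2) (0 : Int) = 0 :: 0 :: List.replicate m 0 := by
        simp [List.replicate_succ]
      rw [h]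
      have h2 : gA 0 ((0 : Int) :: 0 :: List.replicate m 0)
          = 1 + gA 1 (0 :: List.replicate m 0) := by
        cases m with
        | zero => rfl
        | succ m' => simp [gA, List.replicate_succ]
      rw [h2, gA_one_zero, ih m (by omega)]
      have : ((m + 2) / 2 : Nat) = (m / 2 : Nat) + 1 := by omega
      rw [this]; push_cast; ring

-- joint characterisation of the greedy by the run counter T
lemma gA_eq_T : ∀ (N : Nat) (fb : List Int), fb.length ≤ N →
    (∀ z : Nat, gA 0 (List.replicate z 0 ++ fb ++ [0]) = T (z + 1) fb) ∧
    (∀ v : Int, v ≠ 0 → gA v (fb ++ [0]) = T 0 fb) := by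
  intro N
  induction N with
  | zero =>
    intro fb hfb
    have : fb = [] := by cases fb <;> simp_all
    subst this
    constructor
    · intro z
      have : List.replicate z (0 : Int) ++ [] ++ [0] = List.replicate (z + 1) 0 := by
        simp [List.replicate_succ']
      rw [this, gA_zeros]; rfl
    · intro v hv; simp [gA, T]
  | succ N ihN =>
    intro fb hfb
    match fb with
    | [] =>
      constructor
      · intro z
        have : List.replicate z (0 : Int) ++ [] ++ [0] = List.replicate (z + 1) 0 := by
          simp [List.replicate_succ']
        rw [this, gA_zeros]; rfl
      · intro v hv; simp [gA, T]
    | x :: r =>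
      have hr : r.length ≤ N := by simp at hfb; omega
      by_cases hx : x = 0
      · subst hx
        constructor
        · intro z
          have h : List.replicate z (0 : Int) ++ (0 :: r) ++ [0]
              = List.replicate (z + 1) 0 ++ r ++ [0] := by
            simp [List.replicate_succ']
          rw [h, (ihN r hr).1 (z + 1)]
          simp [T]
        · intro v hv
          have h : (0 : Int) :: r ++ [0] = 0 :: (r ++ [0]) := by simp
          have h2 : gA v ((0 : Int) :: (r ++ [0])) = gA 0 (r ++ [0]) := by
            cases r with
            | nil => simp [gA, hv]
            | cons w s => simp [gA, hv]
          have h3 : gA 0 (r ++ [0]) = T 1 r := by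
            have := (ihN r hr).1 0
            simpa using this
          rw [h, h2, h3]; simp [T]
      · constructor
        · intro z
          have h : List.replicate z (0 : Int) ++ (x :: r) ++ [0]
              = List.replicate z 0 ++ x :: (r ++ [0]) := by simp
          rw [h, gA_run z x (r ++ [0]) hx, (ihN r hr).2 x hx]
          simp [T, hx]
        · intro v hv
          have h : (x :: r) ++ [0] = x :: (r ++ [0]) := by simp
          have h2 : gA v (x :: (r ++ [0])) = gA x (r ++ [0]) := by
            cases r with
            | nil => simp [gA, hx]
            | cons w s =>
              simp only [List.cons_append, gA]
              rw [if_neg]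
              rintro ⟨-, h2, h3⟩
              exact hx (h2.trans h3)
          rw [h, h2]
          by_cases hx2 : x = 0
          · exact absurd hx2 hx
          · rw [(ihN r hr).2 x hx2]
            simp [T, hx2]

-- the fold of A's loop, with invariant: mutated prefix `pre`, previous value `prev`, original suffix
lemma foldA (suffix : List Int) : ∀ (pre : List Int) (prev : Int) (c : Int),
    ((PySem.List.pyRange ((pre.length : Int) + 1)
        ((pre.length : Int) + (suffix.length : Int)) 1).foldl stepA
      (pre ++ prev :: suffix, c)).2 = c + gA prev suffix := by
  induction suffix with
  | nil =>
    intro pre prev c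
    rw [PySem.List.pyRange_one_eq_nil (by simp)]
    simp [gA]
  | cons x r ih =>
    intro pre prev c
    cases r with
    | nil =>
      rw [PySem.List.pyRange_one_eq_nil (by simp)]
      simp [gA]
    | cons y t =>
      rw [PySem.List.pyRange_one_cons (by simp only [List.length_cons]; push_cast; omega)]
      rw [List.foldl_cons]
      have hL : pre ++ prev :: x :: y :: t = (pre ++ [prev]) ++ x :: y :: t := by simp
      have hget0 : PySem.List.pyGetD (pre ++ prev :: x :: y :: t) ((pre.length : Int) + 1 - 1) 0 = prev := by
        have : ((pre.length : Int) + 1 - 1) = ((pre.length : Nat) : Int) := by omega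
        rw [this, PySem.List.pyGetD_natCast, getD_append_len]
      have hget1 : PySem.List.pyGetD (pre ++ prev :: x :: y :: t) ((pre.length : Int) + 1) 0 = x := by
        have h1 : ((pre.length : Int) + 1) = (((pre.length + 1 : Nat)) : Int) := by omega
        rw [h1, PySem.List.pyGetD_natCast, hL]
        have h2 : (pre.length + 1) = (pre ++ [prev]).length := by simp
        rw [h2, getD_append_len]
      have hget2 : PySem.List.pyGetD (pre ++ prev :: x :: y :: t) ((pre.length : Int) + 1 + 1) 0 = y := by
        have h1 : ((pre.length : Int) + 1 + 1) = (((pre.length + 2 : Nat)) : Int) := by omega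
        rw [h1, PySem.List.pyGetD_natCast]
        have h2 : pre ++ prev :: x :: y :: t = (pre ++ [prev, x]) ++ y :: t := by simp
        rw [h2]
        have h3 : (pre.length + 2) = (pre ++ [prev, x]).length := by simp
        rw [h3, getD_append_len]
      by_cases hc : prev = x ∧ x = y ∧ y = 0
      · have hstep : stepA (pre ++ prev :: x :: y :: t, c) ((pre.length : Int) + 1)
            = ((pre ++ [prev]) ++ 1 :: y :: t, c + 1) := by
          unfold stepA
          rw [hget0, hget1, hget2]
          simp only [if_pos hc]
          have hset : PySem.List.pySetD (pre ++ prev :: x :: y :: t) ((pre.length : Int) + 1) 1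
              = (pre ++ [prev]) ++ 1 :: y :: t := by
            have h1 : ((pre.length : Int) + 1) = (((pre.length + 1 : Nat)) : Int) := by omega
            rw [h1, PySem.List.pySetD_natCast, hL]
            have h2 : (pre.length + 1) = (pre ++ [prev]).length + 0 := by simp
            rw [h2, List.set_append_right _ _ (by omega)]
            simp
          rw [hset]
        rw [hstep]
        have key := ih (pre ++ [prev]) 1 (c + 1)
        simp only [List.length_append, List.length_cons, List.length_nil, List.append_assoc,
          List.cons_append, List.singleton_append, List.nil_append] at key ⊢
        push_cast at key ⊢
        ring_nf at key ⊢
        rw [key]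
        have hg : gA prev (x :: y :: t) = 1 + gA 1 (y :: t) := by
          rw [gA, if_pos hc]
        rw [hg]
        ring
      · have hstep : stepA (pre ++ prev :: x :: y :: t, c) ((pre.length : Int) + 1)
            = (pre ++ prev :: x :: y :: t, c) := by
          unfold stepA
          rw [hget0, hget1, hget2]
          simp only [if_neg hc]
        rw [hstep]
        have key := ih (pre ++ [prev]) x c
        simp only [List.length_append, List.length_cons, List.length_nil, List.append_assoc,
          List.cons_append, List.singleton_append, List.nil_append] at key ⊢
        push_cast at key ⊢
        ring_nf at key ⊢
        rw [key]
        have hg : gA prev (x :: y :: t) = gA x (y :: t) := by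
          rw [gA, if_neg hc]
        rw [hg]

lemma portA_eq (fb : List Int) (n : Int) :
    can_place_flowers fb n = decide (T 1 fb ≥ n) := by
  unfold can_place_flowers
  have h := foldA (fb ++ [0]) [] 0 0
  have h2 := (gA_eq_T fb.length fb le_rfl).1 0
  simp only [List.replicate_zero, List.nil_append, Nat.zero_add] at h2
  simp only [List.length_nil, List.length_append, List.length_cons, List.nil_append,
    List.cons_append] at h ⊢
  push_cast at h ⊢
  ring_nf at h ⊢
  simp only [h, h2]

-- B side
lemma onesF_eq (fb : List Int) : ∀ i : Int,
    ((PySem.List.enumerate fb i).filter (fun p => p.2 != 0)).map (fun p => p.1) = onesF i fb := by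
  induction fb with
  | nil => intro i; simp [onesF]
  | cons x r ih =>
    intro i
    rw [PySem.List.enumerate_cons]
    by_cases hx : x = 0
    · simp [hx, onesF, ih]
    · simp [hx, onesF, ih]

lemma zipsum (l : List Int) : ∀ (p e : Int),
    (((p :: l ++ [e]).zip (p :: l ++ [e]).tail).map
      (fun pq => max (PySem.Int.floordiv (pq.2 - pq.1 - 2) 2) 0)).sum = S p l e := by
  induction l with
  | nil => intro p e; simp [S]
  | cons q r ih =>
    intro p e
    simp only [List.cons_append, List.tail_cons, List.zip_cons_cons, List.map_cons, List.sum_cons]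
    have := ih q e
    simp only [List.cons_append, List.tail_cons] at this
    rw [this, S]

lemma max_floordiv_nat (z : Nat) :
    max (PySem.Int.floordiv ((z : Int)) 2) 0 = ((z / 2 : Nat) : Int) := by
  rw [PySem.Int.floordiv_eq_ediv_of_pos (by norm_num)]
  omega

lemma max_floordiv_pred (z : Nat) :
    max (PySem.Int.floordiv ((z : Int) - 1) 2) 0 = (((z - 1) / 2 : Nat) : Int) := by
  cases z with
  | zero => decide
  | succ m =>
    have : ((m + 1 : Nat) : Int) - 1 = (m : Int) := by push_cast; ring
    rw [this, PySem.Int.floordiv_eq_ediv_of_pos (by norm_num)]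
    omega

lemma S_eq_T (fb : List Int) : ∀ (i z : Nat),
    S ((i : Int) - 1 - (z : Int)) (onesF (i : Int) fb) ((i : Int) + (fb.length : Int) + 1) = T z fb := by
  induction fb with
  | nil =>
    intro i z
    simp only [onesF, S, T, List.length_nil, Nat.cast_zero, add_zero]
    have h : ((i : Int) + 1 - ((i : Int) - 1 - (z : Int)) - 2) = (z : Int) := by ring
    rw [h, max_floordiv_nat]
  | cons x r ih =>
    intro i z
    by_cases hx : x = 0
    · simp only [onesF, T, List.length_cons]
      rw [if_pos hx, if_pos hx]
      have h1 : ((i : Int) - 1 - (z : Int)) = (((i + 1 : Nat) : Int) - 1 - ((z + 1 : Nat) : Int)) := by push_cast; ring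
      rw [h1]
      have key := ih (i + 1) (z + 1)
      push_cast at key ⊢
      convert key using 3 <;> (push_cast; ring)
    · simp only [onesF, T, List.length_cons]
      rw [if_neg hx, if_neg hx, S]
      have harg : ((i : Int) - ((i : Int) - 1 - (z : Int)) - 2) = (z : Int) - 1 := by ring
      rw [harg, max_floordiv_pred]
      congr 1
      have key := ih (i + 1) 0
      push_cast at key
      have h3 : ((i : Int) + 1 - 1 - 0) = (i : Int) := by ring
      rw [h3] at key
      rw [show ((i : Int) + ((r.length + 1 : Nat) : Int) + 1) = ((i : Int) + 1 + (r.length : Int) + 1) by push_cast; ring]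
      exact key

lemma portB_eq (fb : List Int) (n : Int) :
    can_place_flowers_alt fb n = decide (T 1 fb ≥ n) := by
  unfold can_place_flowers_alt
  simp only [onesF_eq fb 0]
  have hz := zipsum (onesF 0 fb) (-2) ((fb.length : Int) + 1)
  have hS := S_eq_T fb 0 1
  norm_num at hS
  simp only [List.cons_append] at hz ⊢
  simp only [hz]
  simp only [show ((-2 : Int)) = ((0 : Int) - 1 - 1) by ring] at hS ⊢
  simp only [show ((fb.length : Int) + 1) = ((0 : Int) + (fb.length : Int) + 1) by ring] at hS ⊢
  simp only [hS]

-- ===== VERDICT (by name: the statement is the Claim_ definition above) =====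
theorem can_place_flowers_spec : Claim_equal_can_place_flowers := by
  intro fb n _
  unfold Spec_can_place_flowers
  rw [portA_eq, portB_eq]
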